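-- pv_equiv track=rewrite | github.com/yashinrostislav/Ozon_Masters_2021 | 1_ml/hw_1/find_max_substring_occurrence.py | find_max_substring_occurrence
-- ===== SOURCE A (Python) =====
-- def find_max_substring_occurrence(str_1):
--     tmp = 0
--     for i in range(1, len(str_1) + 1):
--         sub_str = str_1[:i]
--         k = len(str_1) // len(sub_str)
--         if str_1 == sub_str * k:
--             tmp = max(k, tmp)
--     return tmp
-- ===== SOURCE B (Python) =====
-- def find_max_substring_occurrence(str_1):
--     if not str_1:
--         return 0
--     # smallest p >= 1 with str_1 equal to its own rotation by p is the smallest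
--     # period that tiles the string; it is found as the first occurrence of
--     # str_1 inside str_1 + str_1 at a positive offset, and it divides len(str_1).
--     return len(str_1) // (str_1 + str_1).find(str_1, 1)
-- ===== Notes on version B (the rewrite author's own statement) =====
-- stated objective: faster
-- what changed: B drops A's loop over all n prefixes entirely: it finds the smallest tiling period as the first positive offset at which str_1 occurs in str_1+str_1 (one substring search on the doubled string) and returns len//offset.
import Mathlib
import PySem

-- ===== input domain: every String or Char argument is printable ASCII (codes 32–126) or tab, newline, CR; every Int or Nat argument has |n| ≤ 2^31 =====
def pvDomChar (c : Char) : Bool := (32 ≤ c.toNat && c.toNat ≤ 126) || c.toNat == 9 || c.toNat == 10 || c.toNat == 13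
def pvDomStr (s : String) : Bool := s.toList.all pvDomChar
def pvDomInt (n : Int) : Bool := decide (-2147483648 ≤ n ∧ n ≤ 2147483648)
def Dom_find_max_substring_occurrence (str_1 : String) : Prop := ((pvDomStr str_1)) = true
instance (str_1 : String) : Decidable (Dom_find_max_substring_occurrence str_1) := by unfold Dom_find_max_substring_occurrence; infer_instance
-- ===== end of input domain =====

-- B replaces A's loop over all prefixes by one substring search in the doubled string
-- (smallest rotation offset = smallest tiling period); faster, same return value everywhere.

-- ===== PORT A =====
-- literal port of A: for i in range(1, len+1): sub = str_1[:i]; k = len // len(sub); if str_1 == sub * k: tmp = max(k, tmp)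
def find_max_substring_occurrence (str_1 : String) : Int :=
  (PySem.List.pyRange 1 ((str_1.toList.length : Int) + 1) 1).foldl
    (fun tmp i =>
      let sub := PySem.List.slice str_1.toList none (some i)
      let k := PySem.Int.floordiv (str_1.toList.length : Int) (sub.length : Int)
      if str_1.toList = PySem.List.pyRepeat sub k then max k tmp else tmp)
    0

-- ===== PORT B =====
-- literal port of Source B: if not str_1: return 0; return len(str_1) // (str_1 + str_1).find(str_1, 1)
def find_max_substring_occurrence_alt (str_1 : String) : Int :=
  if str_1 = "" then 0
  else PySem.Int.floordiv (PySem.Str.len str_1) (PySem.Str.findFrom (str_1 ++ str_1) str_1 1 none)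

-- ===== PRECONDITION & SPEC =====
def Spec_find_max_substring_occurrence (str_1 : String) (out : Int) : Prop := out = find_max_substring_occurrence_alt str_1
instance (str_1 : String) (out : Int) : Decidable (Spec_find_max_substring_occurrence str_1 out) := by unfold Spec_find_max_substring_occurrence; infer_instance

-- ===== CLAIM (what is proved, stated in full; the proofs are below) =====
def Claim_equal_find_max_substring_occurrence : Prop := ∀ (str_1 : String), Dom_find_max_substring_occurrence str_1 → Spec_find_max_substring_occurrence str_1 (find_max_substring_occurrence str_1)

-- ===== LEMMAS AND PROOFS =====

-- 'str_1 == str_1[:i] * (len // i)' as a proposition on the list side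
abbrev pvQ (s : List Char) (i : Nat) : Prop :=
  s = PySem.List.pyRepeat (s.take i) ((s.length / i : Nat) : Int)

-- A's loop body, on the list/Nat side
def pvG (s : List Char) : Int → Nat → Int := fun tmp i =>
  if s = PySem.List.pyRepeat (s.take i) ((s.length / i : Nat) : Int) then
    max ((s.length / i : Nat) : Int) tmp
  else tmp

lemma pvLen_pyRepeat (l : List Char) (k : Nat) :
    (PySem.List.pyRepeat l ((k : Nat) : Int)).length = k * l.length := by
  simp [PySem.List.pyRepeat]

lemma pvQ_dvd {s : List Char} {i : Nat} (_hi : 0 < i) (hin : i ≤ s.length)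
    (hq : pvQ s i) : i ∣ s.length := by
  have hlen := congrArg List.length hq
  rw [pvLen_pyRepeat, List.length_take, Nat.min_eq_left hin] at hlen
  exact ⟨s.length / i, by rw [Nat.mul_comm]; exact hlen⟩

lemma pvQ_self {s : List Char} (h : 0 < s.length) : pvQ s s.length := by
  unfold pvQ
  rw [List.take_length, Nat.div_self h]
  simp [PySem.List.pyRepeat]

-- once the accumulator dominates every remaining candidate, it is the result
lemma pvFoldl_keep (s : List Char) (L : List Nat) (v : Int)
    (h : ∀ i ∈ L, pvQ s i → ((s.length / i : Nat) : Int) ≤ v) :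
    L.foldl (pvG s) v = v := by
  induction L with
  | nil => rfl
  | cons a t ih =>
      by_cases hq : pvQ s a
      · simp only [List.foldl_cons, pvG, if_pos hq]
        rw [max_eq_right (h a (by simp) hq)]
        exact ih (fun i hi hqi => h i (by simp [hi]) hqi)
      · simp only [List.foldl_cons, pvG, if_neg hq]
        exact ih (fun i hi hqi => h i (by simp [hi]) hqi)

-- port A computed on the list/Nat side
lemma pvA_eq (str_1 : String) :
    find_max_substring_occurrence str_1 =
      (List.range' 1 str_1.toList.length).foldl (pvG str_1.toList) 0 := by
  unfold find_max_substring_occurrence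
  rw [PySem.List.pyRange_one, List.foldl_map]
  have hn : (((str_1.toList.length : Int) + 1) - 1).toNat = str_1.toList.length := by omega
  rw [hn, List.range'_eq_map_range, List.foldl_map]
  apply PySem.List.foldl_congr_mem
  intro acc k hk
  have hk' : k < str_1.toList.length := List.mem_range.mp hk
  have hcast : (1 : Int) + (k : Int) = ((1 + k : Nat) : Int) := by push_cast; ring
  have hlen : (str_1.toList.take (1 + k)).length = 1 + k := by
    rw [List.length_take]; omega
  simp only [hcast, PySem.List.slice_to_natCast, hlen, PySem.Int.floordiv_natCast, pvG]

-- A's loop over [d .. n] equals n / d0 at the smallest valid period d0, for every start d ≤ d0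
lemma pvA_run (s : List Char)
    (hex : ∃ d, 1 ≤ d ∧ d ≤ s.length ∧ pvQ s d) :
    ∀ m d, 1 ≤ d → d ≤ Nat.find hex → Nat.find hex - d ≤ m →
      (List.range' d (s.length - d + 1)).foldl (pvG s) 0 =
        ((s.length / Nat.find hex : Nat) : Int) := by
  have hd0 := Nat.find_spec hex
  have hbig : ∀ d, d = Nat.find hex →
      (List.range' d (s.length - d + 1)).foldl (pvG s) 0 =
        ((s.length / Nat.find hex : Nat) : Int) := by
    intro d hdd
    subst hdd
    rw [List.range'_succ, List.foldl_cons]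
    have hq := hd0.2.2
    have hstep : pvG s 0 (Nat.find hex) = ((s.length / Nat.find hex : Nat) : Int) := by
      simp only [pvG, if_pos hq]
      exact max_eq_left (by positivity)
    rw [hstep]
    apply pvFoldl_keep
    intro i hi _hq
    have hmem := List.mem_range'_1.mp hi
    have : s.length / i ≤ s.length / Nat.find hex :=
      Nat.div_le_div_left (by omega) hd0.1
    exact_mod_cast this
  intro m
  induction m with
  | zero =>
      intro d hd1 hdle hsub
      exact hbig d (by omega)
  | succ m ih =>
      intro d hd1 hdle hsub
      by_cases hdd : d = Nat.find hex
      · exact hbig d hdd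
      · have hdlt : d < Nat.find hex := by omega
        have hdn : d ≤ s.length := le_trans hdle hd0.2.1
        have hnq : ¬ pvQ s d := fun hq => Nat.find_min hex hdlt ⟨hd1, hdn, hq⟩
        have hsplit : s.length - d + 1 = (s.length - (d + 1) + 1) + 1 := by omega
        rw [hsplit, List.range'_succ, List.foldl_cons]
        have hstep : pvG s 0 d = 0 := by simp only [pvG, if_neg hnq]
        rw [hstep]
        exact ih (d + 1) (by omega) (by omega) (by omega)

-- getElem transported along a list equality / an index equality
lemma pvGetElem_list {l l' : List Char} (h : l = l') (i : Nat) (hi : i < l.length) :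
    l[i] = l'[i]'(h ▸ hi) := by subst h; rfl

lemma pvGetElem_idx {l : List Char} {i j : Nat} (h : i = j) (hi : i < l.length) :
    l[i] = l[j]'(h ▸ hi) := by subst h; rfl

-- periodicity with period d: every character equals the one at its index mod d
def pvPer (s : List Char) (d : Nat) : Prop :=
  ∀ i (h : i < s.length), s[i] = s[i % d]'(lt_of_le_of_lt (Nat.mod_le i d) h)

-- characters of a tiled list
lemma pvRepeat_getElem (t : List Char) (k i : Nat) (ht : 0 < t.length)
    (h : i < ((List.replicate k t).flatten).length) :
    ((List.replicate k t).flatten)[i] = t[i % t.length]'(Nat.mod_lt i ht) := by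
  induction k generalizing i with
  | zero => simp at h
  | succ k ih =>
      have hcons : (List.replicate (k+1) t).flatten = t ++ (List.replicate k t).flatten := by
        rw [List.replicate_succ, List.flatten_cons]
      have h' : i < (t ++ (List.replicate k t).flatten).length := hcons ▸ h
      rw [pvGetElem_list hcons i h]
      by_cases hi : i < t.length
      · rw [List.getElem_append_left hi]
        exact pvGetElem_idx (Nat.mod_eq_of_lt hi).symm hi
      · rw [List.getElem_append_right (by omega)]
        rw [ih (i - t.length) (by simp at h' ⊢; omega)]
        apply pvGetElem_idx
        conv_rhs => rw [show i = i - t.length + t.length by omega]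
        rw [Nat.add_mod_right]

lemma pvQ_flatten {s : List Char} {d : Nat} (hq : pvQ s d) :
    s = (List.replicate (s.length / d) (s.take d)).flatten := by
  conv_lhs => rw [hq]
  unfold PySem.List.pyRepeat
  rw [Int.toNat_natCast]

lemma pvQ_to_Per {s : List Char} {d : Nat} (h1 : 1 ≤ d) (hdn : d ≤ s.length)
    (hq : pvQ s d) : pvPer s d := by
  intro i hi
  have hfl := pvQ_flatten hq
  have htl : (s.take d).length = d := by rw [List.length_take]; omega
  have ht : 0 < (s.take d).length := by omega
  rw [pvGetElem_list hfl i hi, pvRepeat_getElem (s.take d) _ i ht,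
    pvGetElem_idx (by rw [htl]) (Nat.mod_lt i ht), List.getElem_take]

lemma pvPer_to_pvQ {s : List Char} {d : Nat} (h1 : 1 ≤ d) (hdn : d ≤ s.length)
    (hdvd : d ∣ s.length) (hp : pvPer s d) : pvQ s d := by
  have htl : (s.take d).length = d := by rw [List.length_take]; omega
  unfold pvQ PySem.List.pyRepeat
  rw [Int.toNat_natCast]
  apply List.ext_getElem
  · simp only [List.length_flatten, List.map_replicate, htl, List.sum_replicate, smul_eq_mul]
    exact (Nat.div_mul_cancel hdvd).symm
  · intro i h1' h2'
    have ht : 0 < (s.take d).length := by omega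
    rw [pvRepeat_getElem (s.take d) _ i ht h2',
      pvGetElem_idx (by rw [htl]) (Nat.mod_lt i ht), List.getElem_take]
    exact hp i h1'

-- rotation invariance as a list equation
def pvRot (s : List Char) (d : Nat) : Prop := s = s.drop d ++ s.take d

lemma pvPer_to_Rot {s : List Char} {d : Nat} (h1 : 1 ≤ d) (hdn : d ≤ s.length)
    (hdvd : d ∣ s.length) (hp : pvPer s d) : pvRot s d := by
  obtain ⟨c, hc⟩ := hdvd
  have hc1 : 1 ≤ c := by nlinarith [hc, hdn, h1]
  apply List.ext_getElem
  · simp only [List.length_append, List.length_drop, List.length_take]; omega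
  · intro i h₁ h₂
    by_cases hi : i < s.length - d
    · rw [List.getElem_append_left (by rw [List.length_drop]; omega), List.getElem_drop]
      rw [hp i h₁, hp (d + i) (by omega)]
      apply pvGetElem_idx
      rw [Nat.add_mod_left]
    · rw [List.getElem_append_right (by rw [List.length_drop]; omega), List.getElem_take]
      have hjeq : i - (List.drop d s).length = i - (s.length - d) := by
        rw [List.length_drop]
      have hj : i - (s.length - d) < d := by omega
      rw [pvGetElem_idx hjeq (by simp only [List.length_drop]; omega), hp i h₁,
        hp (i - (s.length - d)) (lt_of_lt_of_le hj hdn)]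
      apply pvGetElem_idx
      have hie : i % d = (i - (s.length - d)) % d := by
        have hnd : s.length - d = d * (c - 1) := by
          cases c with
          | zero => omega
          | succ c => rw [hc]; simp [Nat.mul_succ]
        conv_lhs => rw [show i = (i - (s.length - d)) + d * (c - 1) by omega]
        rw [Nat.add_mul_mod_self_left]
      rw [hie]

lemma pvRot_to_Per {s : List Char} {d : Nat} (h1 : 1 ≤ d) (hdn : d ≤ s.length)
    (hr : pvRot s d) : pvPer s d := by
  have hweak : ∀ j (hj : j < s.length - d), s[j]'(by omega) = s[j + d]'(by omega) := by
    intro j hj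
    rw [pvGetElem_list hr j (by omega),
      List.getElem_append_left (by rw [List.length_drop]; omega), List.getElem_drop]
    apply pvGetElem_idx
    omega
  intro i
  induction i using Nat.strong_induction_on with
  | _ i ih =>
      intro hi
      by_cases hid : i < d
      · exact pvGetElem_idx (Nat.mod_eq_of_lt hid).symm hi
      · have h1' : i - d < s.length - d := by omega
        have hw := hweak (i - d) h1'
        have hwi : s[i - d]'(by omega) = s[i]'hi :=
          hw.trans (pvGetElem_idx (by omega) (by omega))
        have hmod : (i - d) % d = i % d := by
          conv_rhs => rw [show i = i - d + d by omega]
          rw [Nat.add_mod_right]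
        rw [← hwi, ih (i - d) (by omega) (by omega)]
        exact pvGetElem_idx hmod (lt_of_le_of_lt (Nat.mod_le _ _) (by omega))

-- occurrence of s in s ++ s at offset p (p ≤ |s|) is exactly rotation invariance
lemma pvOcc_iff_Rot {s : List Char} {p : Nat} (hpn : p ≤ s.length) :
    (s <+: (s ++ s).drop p) ↔ pvRot s p := by
  rw [List.drop_append_of_le_length hpn, List.prefix_iff_eq_take]
  unfold pvRot
  rw [List.take_append]
  have h1 : (s.drop p).take s.length = s.drop p := by
    apply List.take_of_length_le; rw [List.length_drop]; omega
  rw [h1, List.length_drop, show s.length - (s.length - p) = p by omega]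

lemma pvRot_rotate {s : List Char} {d : Nat} (hdn : d ≤ s.length) :
    pvRot s d ↔ s.rotate d = s := by
  rw [List.rotate_eq_drop_append_take hdn]
  exact ⟨fun h => h.symm, fun h => h.symm⟩

-- a rotation offset that does not divide the length yields a smaller one
lemma pvRot_mod {s : List Char} {p : Nat} (h1 : 1 ≤ p) (hpn : p ≤ s.length)
    (hr : pvRot s p) : pvRot s (s.length % p) := by
  have hrot : s.rotate p = s := (pvRot_rotate hpn).mp hr
  have hmul : ∀ k, s.rotate (k * p) = s := by
    intro k
    induction k with
    | zero => simp
    | succ k ih =>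
        rw [Nat.succ_mul, ← List.rotate_rotate, ih, hrot]
  have hsplit : s.length = (s.length / p) * p + s.length % p := by
    rw [Nat.mul_comm]; exact (Nat.div_add_mod _ _).symm
  have hres : s.rotate (s.length % p) = s := by
    calc s.rotate (s.length % p)
        = (s.rotate ((s.length / p) * p)).rotate (s.length % p) := by
          rw [hmul (s.length / p)]
      _ = s.rotate ((s.length / p) * p + s.length % p) := List.rotate_rotate ..
      _ = s.rotate s.length := by rw [← hsplit]
      _ = s := List.rotate_length s
  exact (pvRot_rotate (le_trans (Nat.le_of_lt (Nat.mod_lt _ (by omega))) hpn)).mpr hres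

-- ===== VERDICT (by name: the statement is the Claim_ definition above) =====
theorem find_max_substring_occurrence_spec : Claim_equal_find_max_substring_occurrence := by
  intro str_1 _
  unfold Spec_find_max_substring_occurrence find_max_substring_occurrence_alt
  by_cases hnil : str_1 = ""
  · subst hnil
    rw [if_pos rfl, pvA_eq]
    rfl
  · rw [if_neg hnil]
    have hpos : 0 < str_1.toList.length := by
      rcases Nat.eq_zero_or_pos str_1.toList.length with h | h
      · exact absurd (by simpa [String.toList_eq_nil_iff] using List.eq_nil_of_length_eq_zero h) hnil
      · exact h
    set s := str_1.toList with hs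
    -- the positive-offset occurrence search in s ++ s
    rw [PySem.Str.findFrom_eq, PySem.Str.len_eq, String.toList_append, ← hs]
    have h2n : (1 : Nat) ≤ (s ++ s).length := by rw [List.length_append]; omega
    have hne : PySem.Chars.findFrom (s ++ s) s ((1 : Nat) : Int) none ≠ -1 := by
      intro hcontra
      rw [PySem.Chars.findFrom_natCast_eq_neg_one_iff (s ++ s) s 1 h2n] at hcontra
      have hsuf : s <:+ (s ++ s).drop 1 := by
        rw [List.drop_append_of_le_length (by omega)]
        exact List.suffix_append _ _
      exact hcontra hsuf.isInfix
    obtain ⟨h1r, hocc, hmin⟩ :=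
      PySem.Chars.findFrom_natCast_spec (s ++ s) s 1 h2n hne
    simp only [Nat.cast_one] at h1r hocc hmin
    set r := PySem.Chars.findFrom (s ++ s) s (1 : Int) with hrdef
    set p := r.toNat with hpdef
    have h1p : 1 ≤ p := by
      have : (1 : Int) ≤ r := by exact_mod_cast h1r
      omega
    have hoccn : s <+: (s ++ s).drop s.length := by
      rw [List.drop_append_of_le_length (le_refl _), List.drop_length, List.nil_append]
    have hpn : p ≤ s.length := by
      by_contra hgt
      exact hmin s.length (by omega) (by omega) hoccn
    have hrotp : pvRot s p := (pvOcc_iff_Rot hpn).mp hocc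
    have hdvd : p ∣ s.length := by
      by_contra hnd
      have hg1 : 1 ≤ s.length % p := by
        rcases Nat.eq_zero_or_pos (s.length % p) with h | h
        · exact absurd (Nat.dvd_of_mod_eq_zero h) hnd
        · exact h
      have hglt : s.length % p < p := Nat.mod_lt _ (by omega)
      have hrg : pvRot s (s.length % p) := pvRot_mod h1p hpn hrotp
      exact hmin (s.length % p) hg1 hglt ((pvOcc_iff_Rot (by omega)).mpr hrg)
    have hQp : pvQ s p := pvPer_to_pvQ h1p hpn hdvd (pvRot_to_Per h1p hpn hrotp)
    -- the minimal tiling period of A's loop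
    have hex : ∃ d, 1 ≤ d ∧ d ≤ s.length ∧ pvQ s d :=
      ⟨s.length, hpos, le_refl _, pvQ_self hpos⟩
    have hd0le : Nat.find hex ≤ p := Nat.find_min' hex ⟨h1p, hpn, hQp⟩
    have hd0 := Nat.find_spec hex
    have hpled0 : p ≤ Nat.find hex := by
      by_contra hlt
      have hPer0 : pvPer s (Nat.find hex) := pvQ_to_Per hd0.1 hd0.2.1 hd0.2.2
      have hdvd0 : Nat.find hex ∣ s.length := pvQ_dvd hd0.1 hd0.2.1 hd0.2.2
      have hRot0 : pvRot s (Nat.find hex) := pvPer_to_Rot hd0.1 hd0.2.1 hdvd0 hPer0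
      exact hmin (Nat.find hex) hd0.1 (by omega) ((pvOcc_iff_Rot hd0.2.1).mpr hRot0)
    have hpd0 : p = Nat.find hex := le_antisymm hpled0 hd0le
    -- A's value
    have hA := pvA_run s hex (Nat.find hex) 1 (le_refl 1) hd0.1 (by omega)
    have hn : s.length - 1 + 1 = s.length := by omega
    rw [hn] at hA
    rw [pvA_eq, ← hs, hA]
    -- B's value
    have hr' : r = ((p : Nat) : Int) := by
      have : (0 : Int) ≤ r := by
        have : (1 : Int) ≤ r := by exact_mod_cast h1r
        omega
      rw [hpdef, Int.toNat_of_nonneg this]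
    rw [hr', hpd0, PySem.Int.floordiv_natCast]
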